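-- pv_equiv track=rewrite | github.com/ramtanniru/DSA | Python/Companies/Zenoti/circularString.py | solve
-- ===== SOURCE A (Python) =====
-- def solve(s1,s2):
--     s1_set = set([i for i in s1])
--     s2 = s2 + s2
--     maxEle =''
--     curr = []
--     for c in s2:
--         if c in s1_set:
--             curr = []
--         else:
--             curr.append(c)
--             if len(curr)>len(maxEle):
--                 maxEle = ''.join(curr)
--             if len(curr)==len(maxEle):
--                 maxEle = max(maxEle,''.join(curr))
--     return maxEle+s1
-- ===== SOURCE B (Python) =====
-- def solve(s1, s2):
--     # Mark every character of s1 with a sentinel, split into the runs between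
--     # them, and take the best complete run under the (length, lexicographic)
--     # key: A's per-character prefix candidates are dominated by their full run.
--     sep = '\0'
--     table = {ord(c): sep for c in set(s1)}
--     tr = (s2 + s2).translate(table)
--     if tr.count(sep) == len(tr):
--         return '' + s1          # no allowed character at all
--     runs = tr.split(sep)
--     best = max(zip(map(len, runs), runs))[1]
--     return best + s1
-- ===== Notes on version B (the rewrite author's own statement) =====
-- stated objective: faster
-- what changed: Instead of re-joining and comparing every growing prefix of the current run per character, B marks s1's characters with a sentinel via str.translate, splits into complete runs once, and takes the best run under the (length, lexicographic) key with a single C-level max over (len, run) pairs (with an early '' answer when no character is allowed).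
import Mathlib
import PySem

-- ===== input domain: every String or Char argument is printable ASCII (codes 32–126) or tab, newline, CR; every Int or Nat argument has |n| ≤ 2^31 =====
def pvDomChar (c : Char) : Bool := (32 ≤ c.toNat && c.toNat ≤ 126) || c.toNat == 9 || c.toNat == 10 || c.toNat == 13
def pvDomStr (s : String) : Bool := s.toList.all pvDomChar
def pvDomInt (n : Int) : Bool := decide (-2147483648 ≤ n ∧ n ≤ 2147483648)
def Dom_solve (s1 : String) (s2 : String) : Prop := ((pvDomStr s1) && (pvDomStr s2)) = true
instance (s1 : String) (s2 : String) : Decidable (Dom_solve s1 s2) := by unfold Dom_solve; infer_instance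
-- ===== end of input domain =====

-- B replaces A's per-character prefix-join-and-compare with a sentinel-marking run
-- split plus one max pass over complete runs; proved to return the same string.

-- Python string '<' : lexicographic on code points (shared by both ports' comparisons)
def strLt : List Char → List Char → Bool
  | [], [] => false
  | [], _ :: _ => true
  | _ :: _, [] => false
  | a :: as, b :: bs => if a < b then true else if b < a then false else strLt as bs

-- ===== PORT A =====
-- max(maxEle, ''.join(curr)) : returns the second iff it is strictly greater
def pyMaxStr (a b : List Char) : List Char := if strLt a b then b else a

-- one iteration of A's 'for c in s2' loop; state = (maxEle, curr)
def stepA (bad : PySem.Set Char) (st : List Char × List Char) (c : Char) :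
    List Char × List Char :=
  if PySem.Set.contains bad c then (st.1, [])
  else
    let curr := st.2 ++ [c]
    let m1 := if st.1.length < curr.length then curr else st.1
    let m2 := if curr.length == m1.length then pyMaxStr m1 curr else m1
    (m2, curr)

def solve (s1 : String) (s2 : String) : String :=
  let s1set := PySem.Set.ofList s1.toList
  let t := s2.toList ++ s2.toList
  let st := t.foldl (stepA s1set) ([], [])
  String.ofList (st.1 ++ s1.toList)

-- ===== PORT B =====
-- (len(best), best) < (len(r), r) : Python tuple comparison
def keyLt (a b : List Char) : Bool :=
  a.length < b.length || (a.length == b.length && strLt a b)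

-- t.translate(table), table sending every char of set(s1) to the sentinel '\0'
-- (exact: translate is a per-character map, chars not in the table unchanged)
def translateBad (bad : PySem.Set Char) (t : List Char) : List Char :=
  t.map (fun c => if PySem.Set.contains bad c then Char.ofNat 0 else c)

-- s.split('\0') : hand-ported, exact for a one-character separator (empty pieces kept)
def splitSep : List Char → List (List Char)
  | [] => [[]]
  | c :: rest =>
      let r := splitSep rest
      if c = Char.ofNat 0 then [] :: r
      else (c :: r.headI) :: r.tail

def pick (b r : List Char) : List Char := if keyLt b r then r else b

-- max(runs, key=lambda r: (len(r), r)) : first maximum under the key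
def pyMaxKey : List (List Char) → List Char
  | [] => []        -- unreachable: split always returns at least one piece
  | r :: rest => rest.foldl pick r

def solve_alt (s1 : String) (s2 : String) : String :=
  let table := PySem.Set.ofList s1.toList
  let tr := translateBad table (s2.toList ++ s2.toList)
  -- tr.count(sep) for the one-char sentinel = character count (exact)
  if tr.count (Char.ofNat 0) = tr.length then String.ofList ([] ++ s1.toList)
  else
    let runs := splitSep tr
    let best := pyMaxKey runs
    String.ofList (best ++ s1.toList)

-- ===== PRECONDITION & SPEC =====
def Spec_solve (s1 : String) (s2 : String) (out : String) : Prop := out = solve_alt s1 s2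
instance (s1 : String) (s2 : String) (out : String) : Decidable (Spec_solve s1 s2 out) := by unfold Spec_solve; infer_instance

-- ===== CLAIM (what is proved, stated in full; the proofs are below) =====
def Claim_equal_solve : Prop := ∀ (s1 : String) (s2 : String), Dom_solve s1 s2 → Spec_solve s1 s2 (solve s1 s2)

-- ===== LEMMAS AND PROOFS =====

-- proof-only helper: the run split of t as a single left fold; state = (runs, cur)
def stepB (bad : PySem.Set Char) (st : List (List Char) × List Char) (c : Char) :
    List (List Char) × List Char :=
  if PySem.Set.contains bad c then (st.1 ++ [st.2], []) else (st.1, st.2 ++ [c])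

theorem strLt_irrefl (a : List Char) : strLt a a = false := by
  induction a with
  | nil => rfl
  | cons c cs ih => simp [strLt, ih]

theorem strLt_trans {a b c : List Char} (h1 : strLt a b = true) (h2 : strLt b c = true) :
    strLt a c = true := by
  induction a generalizing b c with
  | nil =>
    cases b with
    | nil => simp [strLt] at h1
    | cons y ys =>
      cases c with
      | nil => simp [strLt] at h2
      | cons z zs => rfl
  | cons x xs ih =>
    cases b with
    | nil => simp [strLt] at h1
    | cons y ys =>
      cases c with
      | nil => simp [strLt] at h2
      | cons z zs =>
        simp only [strLt] at h1 h2 ⊢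
        by_cases hxy : x < y
        · by_cases hyz : y < z
          · simp [lt_trans hxy hyz]
          · rw [if_neg hyz] at h2
            by_cases hzy : z < y
            · rw [if_pos hzy] at h2; exact absurd h2 (by simp)
            · have hyzeq : y = z := le_antisymm (not_lt.mp hzy) (not_lt.mp hyz)
              subst hyzeq
              simp [hxy]
        · rw [if_neg hxy] at h1
          by_cases hyx : y < x
          · rw [if_pos hyx] at h1; exact absurd h1 (by simp)
          · rw [if_neg hyx] at h1
            have hxyeq : x = y := le_antisymm (not_lt.mp hyx) (not_lt.mp hxy)
            subst hxyeq
            by_cases hxz : x < z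
            · simp [hxz]
            · rw [if_neg hxz] at h2 ⊢
              by_cases hzx : z < x
              · rw [if_pos hzx] at h2; exact absurd h2 (by simp)
              · rw [if_neg hzx] at h2 ⊢; exact ih h1 h2


theorem keyLt_trans {a b c : List Char} (h1 : keyLt a b = true) (h2 : keyLt b c = true) :
    keyLt a c = true := by
  simp only [keyLt, Bool.or_eq_true, Bool.and_eq_true, decide_eq_true_eq, beq_iff_eq] at *
  rcases h1 with h1 | ⟨e1, s1⟩ <;> rcases h2 with h2 | ⟨e2, s2⟩
  · left; omega
  · left; omega
  · left; omega
  · right; exact ⟨by omega, strLt_trans s1 s2⟩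


theorem keyLt_nil_right (a : List Char) : keyLt a [] = false := by
  cases a <;> simp [keyLt, strLt]

theorem pick_nil_right (a : List Char) : pick a [] = a := by
  simp [pick, keyLt_nil_right]

theorem pick_nil_left (a : List Char) : pick [] a = a := by
  cases a <;> simp [pick, keyLt, strLt]

theorem keyLt_append_one (cur : List Char) (c : Char) : keyLt cur (cur ++ [c]) = true := by
  simp [keyLt]

theorem pick_absorb {c d : List Char} (r : List Char) (h : keyLt c d = true) :
    pick (pick r c) d = pick r d := by
  unfold pick
  by_cases hrc : keyLt r c = true
  · simp only [hrc, if_true, h, if_true]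
    have : keyLt r d = true := keyLt_trans hrc h
    simp [this]
  · simp [hrc]

theorem stepA_eq (bad : PySem.Set Char) (m cur : List Char) (c : Char) :
    stepA bad (m, cur) c =
      if PySem.Set.contains bad c then (m, [])
      else (pick m (cur ++ [c]), cur ++ [c]) := by
  unfold stepA
  by_cases hb : PySem.Set.contains bad c = true
  · rw [if_pos hb, if_pos hb]
  · rw [if_neg hb, if_neg hb]
    simp only [Prod.mk.injEq]
    refine ⟨?_, trivial⟩
    simp only [pick, pyMaxStr, keyLt]
    split_ifs with h1 h2 h3 h4 h5 h6 h7 h8 h9 <;>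
      first
        | rfl
        | (simp_all [strLt_irrefl]; omega)
        | simp_all [strLt_irrefl]


theorem main_invariant (bad : PySem.Set Char) (t : List Char) :
    ∀ (m cur : List Char) (runs : List (List Char)),
      m = pick (runs.foldl pick []) cur →
      (t.foldl (stepA bad) (m, cur)).1 =
        ((t.foldl (stepB bad) (runs, cur)).1 ++ [(t.foldl (stepB bad) (runs, cur)).2]).foldl
          pick [] := by
  induction t with
  | nil =>
    intro m cur runs hm
    simpa [List.foldl_append] using hm
  | cons c t ih =>
    intro m cur runs hm
    simp only [List.foldl_cons, stepA_eq, stepB]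
    by_cases hb : PySem.Set.contains bad c = true
    · rw [if_pos hb, if_pos hb]
      exact ih m [] (runs ++ [cur]) (by
        rw [List.foldl_append, List.foldl_cons, List.foldl_nil, pick_nil_right, ← hm])
    · rw [if_neg hb, if_neg hb]
      exact ih (pick m (cur ++ [c])) (cur ++ [c]) runs (by
        rw [hm, pick_absorb _ (keyLt_append_one cur c)])

theorem splitSep_ne_nil (l : List Char) : splitSep l ≠ [] := by
  cases l with
  | nil => simp [splitSep]
  | cons c rest => unfold splitSep; split_ifs <;> simp

theorem headI_cons_tail {α : Type} [Inhabited α] {l : List α} (h : l ≠ []) :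
    l.headI :: l.tail = l := by
  cases l with
  | nil => exact absurd rfl h
  | cons a l => rfl

theorem translateBad_cons (bad : PySem.Set Char) (c : Char) (t : List Char) :
    translateBad bad (c :: t) =
      (if PySem.Set.contains bad c then Char.ofNat 0 else c) :: translateBad bad t := rfl

theorem splitSep_cons_sep (rest : List Char) :
    splitSep (Char.ofNat 0 :: rest) = [] :: splitSep rest := by
  simp [splitSep]

theorem splitSep_cons_nonsep (c : Char) (rest : List Char) (h : c ≠ Char.ofNat 0) :
    splitSep (c :: rest) =
      (c :: (splitSep rest).headI) :: (splitSep rest).tail := by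
  simp [splitSep, h]

-- the left-fold run split equals the sentinel-translate-and-split run list
theorem runs_eq (bad : PySem.Set Char) (t : List Char) :
    ∀ (runs : List (List Char)) (cur : List Char), Char.ofNat 0 ∉ t →
      (t.foldl (stepB bad) (runs, cur)).1 ++ [(t.foldl (stepB bad) (runs, cur)).2] =
        runs ++ (cur ++ (splitSep (translateBad bad t)).headI) ::
          (splitSep (translateBad bad t)).tail := by
  induction t with
  | nil =>
    intro runs cur _
    simp [translateBad, splitSep]
  | cons c t ih =>
    intro runs cur h0
    have h0t : Char.ofNat 0 ∉ t := fun h => h0 (List.mem_cons_of_mem _ h)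
    have hS := splitSep_ne_nil (translateBad bad t)
    simp only [List.foldl_cons, stepB, translateBad_cons]
    by_cases hb : PySem.Set.contains bad c = true
    · rw [if_pos hb, if_pos hb, splitSep_cons_sep]
      rw [ih (runs ++ [cur]) [] h0t, List.nil_append, headI_cons_tail hS]
      simp
    · have hc0 : c ≠ Char.ofNat 0 := fun h => h0 (h ▸ List.mem_cons_self)
      rw [if_neg hb, if_neg hb, splitSep_cons_nonsep c _ hc0]
      rw [ih runs (cur ++ [c]) h0t]
      simp

theorem foldl_pick_nil (runs : List (List Char)) :
    runs.foldl pick [] = pyMaxKey runs := by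
  cases runs with
  | nil => rfl
  | cons r rest => simp only [pyMaxKey, List.foldl_cons, pick_nil_left]

theorem pyMaxKey_all_sep (l : List Char) (h : ∀ c ∈ l, c = Char.ofNat 0) :
    pyMaxKey (splitSep l) = [] := by
  induction l with
  | nil => rfl
  | cons c rest ih =>
    have hc : c = Char.ofNat 0 := h c List.mem_cons_self
    have hrest : ∀ x ∈ rest, x = Char.ofNat 0 := fun x hx => h x (List.mem_cons_of_mem _ hx)
    subst hc
    rw [splitSep_cons_sep]
    simp only [pyMaxKey]
    rw [foldl_pick_nil]
    exact ih hrest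

theorem nul_not_mem (s : String) (h : pvDomStr s = true) : Char.ofNat 0 ∉ s.toList := by
  intro hc
  unfold pvDomStr at h
  have := List.all_eq_true.mp h _ hc
  unfold pvDomChar at this
  simp only [Bool.or_eq_true, Bool.and_eq_true, decide_eq_true_eq, beq_iff_eq] at this
  have h0 : (Char.ofNat 0).toNat = 0 := by decide
  omega

-- ===== VERDICT (by name: the statement is the Claim_ definition above) =====
theorem solve_spec : Claim_equal_solve := by
  intro s1 s2 hdom
  unfold Dom_solve at hdom
  have hs2 : pvDomStr s2 = true := by
    cases h : pvDomStr s1 <;> cases h2 : pvDomStr s2 <;> simp_all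
  have h0 : Char.ofNat 0 ∉ s2.toList ++ s2.toList := by
    intro h
    rcases List.mem_append.mp h with h | h <;> exact nul_not_mem s2 hs2 h
  unfold Spec_solve solve solve_alt
  simp only
  have hmain :
      ((s2.toList ++ s2.toList).foldl (stepA (PySem.Set.ofList s1.toList)) ([], [])).1 =
        pyMaxKey (splitSep (translateBad (PySem.Set.ofList s1.toList)
          (s2.toList ++ s2.toList))) := by
    rw [main_invariant (PySem.Set.ofList s1.toList) (s2.toList ++ s2.toList) [] [] [] (by rfl)]
    rw [runs_eq (PySem.Set.ofList s1.toList) (s2.toList ++ s2.toList) [] [] h0]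
    rw [List.nil_append, List.nil_append, foldl_pick_nil,
      headI_cons_tail (splitSep_ne_nil (translateBad (PySem.Set.ofList s1.toList)
        (s2.toList ++ s2.toList)))]
  by_cases hcnt :
      (translateBad (PySem.Set.ofList s1.toList) (s2.toList ++ s2.toList)).count (Char.ofNat 0) =
        (translateBad (PySem.Set.ofList s1.toList) (s2.toList ++ s2.toList)).length
  · rw [if_pos hcnt, hmain,
      pyMaxKey_all_sep _ (fun c hc => (List.count_eq_length.mp hcnt c hc).symm)]
  · rw [if_neg hcnt, hmain]
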